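-- pv_equiv track=rewrite | github.com/jacobdweightman/metamorphic-testing | kth_occurrence.py | kth_occurrence
-- ===== SOURCE A (Python) =====
-- def kth_occurrence(x, k, A):
--     '''
--     Searches an unsorted iterable A for the kth occurrence of x. Returns the
--     index of this occurrence if there is one, or -1 otherwise.
--     '''
--     count = 0
--
--     for i in range(len(A)):
--         if A[i] == x:
--             count += 1
--             if count == k:
--                 return i
--     return -1
-- ===== SOURCE B (Python) =====
-- def kth_occurrence(x, k, A):
--     hits = [i for i, v in enumerate(A) if v == x]
--     return hits[k - 1] if 0 < k <= len(hits) else -1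
-- ===== Notes on version B (the rewrite author's own statement) =====
-- stated objective: idiomatic
-- what changed: B separates collecting all hit indices (one comprehension over enumerate) from selecting the kth with a bounds guard, instead of interleaving a running counter with an early return.
import Mathlib
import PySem

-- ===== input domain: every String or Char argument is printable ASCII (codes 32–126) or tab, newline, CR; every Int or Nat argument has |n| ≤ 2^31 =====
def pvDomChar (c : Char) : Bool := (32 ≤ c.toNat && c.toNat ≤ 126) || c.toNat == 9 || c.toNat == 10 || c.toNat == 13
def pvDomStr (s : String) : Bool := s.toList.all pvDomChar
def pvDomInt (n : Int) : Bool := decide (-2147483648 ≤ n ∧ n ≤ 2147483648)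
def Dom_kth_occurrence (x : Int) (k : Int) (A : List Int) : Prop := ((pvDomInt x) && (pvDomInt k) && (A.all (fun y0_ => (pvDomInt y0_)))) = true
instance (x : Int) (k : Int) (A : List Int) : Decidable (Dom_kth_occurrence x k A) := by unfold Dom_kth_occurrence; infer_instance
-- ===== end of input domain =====

-- B separates collecting all hit indices from selecting the kth with a bounds guard; same O(n) cost, plainer shape.

-- ===== PORT A =====
-- A's loop over range(len(A)) with a running counter and early return, as structural recursion.
def kthOccLoop (x : Int) (k : Int) : List Int → Int → Int → Int
  | [], _, _ => -1
  | a :: t, i, count =>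
    if a = x then
      if count + 1 = k then i else kthOccLoop x k t (i + 1) (count + 1)
    else kthOccLoop x k t (i + 1) count

def kth_occurrence (x : Int) (k : Int) (A : List Int) : Int :=
  kthOccLoop x k A 0 0

-- ===== PORT B =====
-- the comprehension [i for i, v in enumerate(A) if v == x], accumulating indices
def kthHits (x : Int) : List Int → Int → List Int
  | [], _ => []
  | a :: t, i => if a = x then i :: kthHits x t (i + 1) else kthHits x t (i + 1)

def kth_occurrence_alt (x : Int) (k : Int) (A : List Int) : Int :=
  let hits := kthHits x A 0
  if 0 < k ∧ k ≤ hits.length then hits.getD (k - 1).toNat (-1) else -1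

-- ===== PRECONDITION & SPEC =====
def Spec_kth_occurrence (x : Int) (k : Int) (A : List Int) (out : Int) : Prop := out = kth_occurrence_alt x k A
instance (x : Int) (k : Int) (A : List Int) (out : Int) : Decidable (Spec_kth_occurrence x k A out) := by unfold Spec_kth_occurrence; infer_instance

-- ===== CLAIM (what is proved, stated in full; the proofs are below) =====
def Claim_equal_kth_occurrence : Prop := ∀ (x : Int) (k : Int) (A : List Int), Dom_kth_occurrence x k A → Spec_kth_occurrence x k A (kth_occurrence x k A)

-- ===== LEMMAS AND PROOFS =====
-- A's interleaved loop equals: select position (k - count) within the remaining hit list.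
theorem kthOccLoop_eq_hits (x k : Int) :
    ∀ (t : List Int) (i count : Int),
      kthOccLoop x k t i count =
        (if 0 < k - count ∧ k - count ≤ (kthHits x t i).length
         then (kthHits x t i).getD (k - count - 1).toNat (-1) else -1) := by
  intro t
  induction t with
  | nil =>
      intro i count
      simp only [kthOccLoop, kthHits, List.length_nil]
      simp
  | cons a t ih =>
      intro i count
      simp only [kthOccLoop, kthHits]
      by_cases hax : a = x
      · rw [if_pos hax, if_pos hax]
        by_cases hk : count + 1 = k
        · have h1 : k - count = 1 := by omega
          have hcond : 0 < k - count ∧ k - count ≤ ((i :: kthHits x t (i + 1)).length : Int) := by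
            simp only [List.length_cons]
            push_cast
            omega
          rw [if_pos hk, if_pos hcond]
          have h0 : (k - count - 1).toNat = 0 := by omega
          simp [h0]
        · rw [if_neg hk, ih]
          by_cases hbig : 0 < k - (count + 1) ∧ k - (count + 1) ≤ ((kthHits x t (i + 1)).length : Int)
          · have hcond : 0 < k - count ∧ k - count ≤ ((i :: kthHits x t (i + 1)).length : Int) := by
              simp only [List.length_cons]
              push_cast
              omega
            rw [if_pos hbig, if_pos hcond]
            have hn : (k - count - 1).toNat = (k - (count + 1) - 1).toNat + 1 := by omega
            simp [hn]
          · have hcond : ¬ (0 < k - count ∧ k - count ≤ ((i :: kthHits x t (i + 1)).length : Int)) := by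
              simp only [List.length_cons]
              push_cast
              push_cast at hbig
              omega
            rw [if_neg hbig, if_neg hcond]
      · rw [if_neg hax, if_neg hax, ih]


-- ===== VERDICT (by name: the statement is the Claim_ definition above) =====
theorem kth_occurrence_spec : Claim_equal_kth_occurrence := by
  intro x k A _
  unfold Spec_kth_occurrence kth_occurrence kth_occurrence_alt
  rw [kthOccLoop_eq_hits]
  simp
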